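-- pv_equiv track=rewrite | github.com/pypi-data/pypi-mirror-381 | packages/g4x_helpers/g4x_helpers-0.5.0-py3-none-any.whl/g4x_helpers/g4x_viewer/bin_generator.py | computeLongestPath
-- ===== SOURCE A (Python) =====
-- from collections import deque
--
-- def returnEndpoints(adj_list, adjacency=2):
--     # Identify endpoints of the MST
--     endpoints = [node for node in adj_list if len(adj_list[node]) == adjacency]
--
--     return endpoints
--
-- def bfs_path(start, end, adj_list):
--     queue = deque([(start, [start])])
--     visited = set()
--     while queue:
--         current, path = queue.popleft()
--         if current == end:
--             return path
--         if current in visited: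
--             continue
--         visited.add(current)
--         for neighbor in adj_list[current]:
--             if neighbor not in visited:
--                 queue.append((neighbor, path + [neighbor]))
--     return []
--
-- def computeLongestPath(adj_list):
--     endpoints = returnEndpoints(adj_list)
--     longest_path = []
--     max_length = 0
--     # Use a dictionary to cache paths and avoid recomputation
--     path_cache = {}
--     # Compute distances between all pairs of endpoints
--     for i in range(len(endpoints)):
--         for j in range(i + 1, len(endpoints)):
--             if (endpoints[i], endpoints[j]) not in path_cache:
--                 path = bfs_path(endpoints[i], endpoints[j], adj_list)
--                 path_cache[(endpoints[i], endpoints[j])] = path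
--             else:
--                 path = path_cache[(endpoints[i], endpoints[j])]
--             if len(path) > max_length:
--                 max_length = len(path)
--                 longest_path = path
--
--     return longest_path
-- ===== SOURCE B (Python) =====
-- from collections import deque
--
-- def computeLongestPath(adj_list):
--     # One full BFS per source endpoint (recording the first path found to every
--     # node) instead of one BFS per endpoint PAIR; the pair scan then only looks
--     # the paths up, keeping A's iteration order and strict-improvement rule.
--     endpoints = [node for node in adj_list if len(adj_list[node]) == 2]
--     best = []
--     for i in range(len(endpoints) - 1):
--         start = endpoints[i]
--         paths = {}
--         queue = deque([(start, [start])])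
--         while queue:
--             current, path = queue.popleft()
--             if current in paths:
--                 continue
--             paths[current] = path
--             for neighbor in adj_list[current]:
--                 if neighbor not in paths:
--                     queue.append((neighbor, path + [neighbor]))
--         for j in range(i + 1, len(endpoints)):
--             p = paths.get(endpoints[j], [])
--             if len(p) > len(best):
--                 best = p
--     return best
-- ===== Notes on version B (the rewrite author's own statement) =====
-- stated objective: alternative
-- what changed: A runs a fresh early-stopping BFS for every pair of degree-2 endpoints (its cache never hits, since each ordered pair occurs once); B instead runs one full BFS per source endpoint that records the first path found to every node, and the pair scan then only looks paths up, keeping A's iteration order and strict-improvement tie-breaking and skipping the last endpoint, whose pair loop is empty.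
-- outside the precondition, e.g. on computeLongestPath({1: [2, 9], 2: [1, 1]}): A returns [1, 2], B raises KeyError
import Mathlib
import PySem

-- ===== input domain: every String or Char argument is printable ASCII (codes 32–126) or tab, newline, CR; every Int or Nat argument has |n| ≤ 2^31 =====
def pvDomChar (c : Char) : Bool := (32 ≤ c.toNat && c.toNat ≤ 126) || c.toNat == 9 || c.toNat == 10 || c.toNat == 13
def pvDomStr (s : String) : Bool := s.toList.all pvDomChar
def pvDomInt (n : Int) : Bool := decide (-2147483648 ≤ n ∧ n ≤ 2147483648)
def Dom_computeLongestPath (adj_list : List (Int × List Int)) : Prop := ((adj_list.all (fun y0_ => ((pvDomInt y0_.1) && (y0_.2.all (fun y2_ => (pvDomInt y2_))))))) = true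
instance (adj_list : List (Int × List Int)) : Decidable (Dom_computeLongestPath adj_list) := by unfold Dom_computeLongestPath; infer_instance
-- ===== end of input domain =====

-- B replaces A's BFS per endpoint PAIR by ONE full BFS per source endpoint whose path map the
-- pair scan only looks up (objective: alternative algorithm); return values agree on Pre_.

-- ===== PORT A =====

-- fuel bound for the Python 'while queue' loop: the queue receives at most one entry per
-- neighbour-list element plus the initial entry, so this many pops always drain it
def pvFuel (adj_list : List (Int × List Int)) : Nat :=
  adj_list.foldl (fun a p => a + p.2.length) 0 + 1

def returnEndpointsPort (adj_list : List (Int × List Int)) (adjacency : Int) : List Int :=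
  let d := PySem.Dict.mk adj_list
  d.keys.filter (fun node => (((d.get? node).getD []).length : Int) == adjacency)

-- bfs_path: 'while queue' as fuel recursion; 'adj_list[current]' on a missing key is a
-- Python KeyError (excluded by Pre_), the 'none' arm returns a junk value there
def bfsPath (endv : Int) (adj : PySem.Dict Int (List Int)) :
    Nat → List (Int × List Int) → PySem.Set Int → List Int
  | 0, _, _ => []
  | _ + 1, [], _ => []
  | fuel + 1, (current, path) :: queue, visited =>
    if current = endv then path
    else if PySem.Set.contains visited current then bfsPath endv adj fuel queue visited
    else
      let visited' := PySem.Set.add visited current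
      match adj.get? current with
      | none => []  -- KeyError in Python; outside Pre_
      | some nbrs =>
        bfsPath endv adj fuel
          (nbrs.foldl (fun q n => if PySem.Set.contains visited' n then q
                                  else q ++ [(n, path ++ [n])]) queue)
          visited'

def computeLongestPath (adj_list : List (Int × List Int)) : List Int :=
  let d := PySem.Dict.mk adj_list
  let endpoints := returnEndpointsPort adj_list 2
  let st := (List.range endpoints.length).foldl (fun st i =>
      ((List.range endpoints.length).drop (i + 1)).foldl (fun st j =>
          let ei := endpoints.getD i 0
          let ej := endpoints.getD j 0
          let pr :=
            match st.1.get? (ei, ej) with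
            | none =>
              let p := bfsPath ej d (pvFuel adj_list) [(ei, [ei])] PySem.Set.empty
              (st.1.insert (ei, ej) p, p)
            | some p => (st.1, p)
          if st.2.1 < (pr.2.length : Int) then (pr.1, ((pr.2.length : Int), pr.2))
          else (pr.1, (st.2.1, st.2.2))) st)
    ((PySem.Dict.empty : PySem.Dict (Int × Int) (List Int)), ((0 : Int), ([] : List Int)))
  st.2.2

-- ===== PORT B =====

-- full BFS from one source: first path found to every reachable node, as a dict
def bfsAll (adj : PySem.Dict Int (List Int)) :
    Nat → List (Int × List Int) → PySem.Dict Int (List Int) → PySem.Dict Int (List Int)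
  | 0, _, paths => paths
  | _ + 1, [], paths => paths
  | fuel + 1, (current, path) :: queue, paths =>
    if paths.contains current then bfsAll adj fuel queue paths
    else
      let paths' := paths.insert current path
      match adj.get? current with
      | none => paths'  -- KeyError in Python; outside Pre_
      | some nbrs =>
        bfsAll adj fuel
          (nbrs.foldl (fun q n => if paths'.contains n then q
                                  else q ++ [(n, path ++ [n])]) queue)
          paths'

def computeLongestPath_alt (adj_list : List (Int × List Int)) : List Int :=
  let d := PySem.Dict.mk adj_list
  let endpoints := d.keys.filter (fun node => (((d.get? node).getD []).length : Int) == 2)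
  (List.range (endpoints.length - 1)).foldl (fun best i =>
      let start := endpoints.getD i 0
      let paths := bfsAll d (pvFuel adj_list) [(start, [start])] PySem.Dict.empty
      ((List.range endpoints.length).drop (i + 1)).foldl (fun best j =>
          let p := paths.getD (endpoints.getD j 0) []
          if best.length < p.length then p else best) best) []

-- ===== PRECONDITION & SPEC =====
-- Pre_ excludes adjacency lists with duplicate keys (no Python dict looks like that, and the
-- association-list convention would not model it) and lists that both mention neighbours that
-- are not keys and have at least two degree-2 endpoints: on those A's BFS raises KeyError or
-- returns only because it stops at the target early, while B's eager per-endpoint BFS may raise.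
def Pre_computeLongestPath (adj_list : List (Int × List Int)) : Prop :=
  (adj_list.map Prod.fst).Nodup ∧
  ((adj_list.filter (fun p => p.2.length == 2)).length ≤ 1 ∨
    ∀ p ∈ adj_list, ∀ n ∈ p.2, n ∈ adj_list.map Prod.fst)
instance (adj_list : List (Int × List Int)) : Decidable (Pre_computeLongestPath adj_list) := by
  unfold Pre_computeLongestPath; infer_instance

def pvWitness_computeLongestPath : (List (Int × List Int)) := [(1, [2]), (2, [1, 3]), (3, [2])]

def Spec_computeLongestPath (adj_list : List (Int × List Int)) (out : List Int) : Prop := out = computeLongestPath_alt adj_list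
instance (adj_list : List (Int × List Int)) (out : List Int) : Decidable (Spec_computeLongestPath adj_list out) := by unfold Spec_computeLongestPath; infer_instance

-- ===== CLAIM (what is proved, stated in full; the proofs are below) =====
def Claim_equal_computeLongestPath : Prop := ∀ (adj_list : List (Int × List Int)), Dom_computeLongestPath adj_list → Pre_computeLongestPath adj_list → Spec_computeLongestPath adj_list (computeLongestPath adj_list)

-- ===== LEMMAS AND PROOFS =====

theorem set_contains_keys (d : PySem.Dict Int (List Int)) (n : Int) :
    PySem.Set.contains d.keys n = d.contains n := by
  simp [PySem.Set.contains_eq_listContains, PySem.Dict.contains_eq_decide_mem_keys]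

theorem get?_none_of_not_contains (d : PySem.Dict Int (List Int)) (k : Int)
    (h : d.contains k = false) : d.get? k = none := by
  have := PySem.Dict.contains_eq_isSome_get? (d := d) (k := k)
  rw [h] at this
  cases hg : d.get? k with
  | none => rfl
  | some v => rw [hg] at this; simp at this

theorem bfsAll_get?_frozen (adj : PySem.Dict Int (List Int)) :
    ∀ (fuel : Nat) (queue : List (Int × List Int)) (paths : PySem.Dict Int (List Int)) (k : Int),
      paths.contains k = true → (bfsAll adj fuel queue paths).get? k = paths.get? k := by
  intro fuel
  induction fuel with
  | zero => intro queue paths k _; simp [bfsAll]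
  | succ fuel ih =>
    intro queue paths k hk
    match queue with
    | [] => simp [bfsAll]
    | (current, path) :: queue =>
      simp only [bfsAll]
      by_cases hc : paths.contains current
      · simp only [hc, if_true]; exact ih queue paths k hk
      · have hne : k ≠ current := by
          intro h; rw [h] at hk; simp [hk] at hc
        have hk' : (paths.insert current path).contains k = true := by
          rw [PySem.Dict.contains_insert]; simp [hk]
        have hget : (paths.insert current path).get? k = paths.get? k :=
          PySem.Dict.get?_insert_of_ne _ _ hne
        cases hadj : adj.get? current with
        | none => simp [hc, hget]
        | some nbrs =>
          simp only [hc, Bool.false_eq_true, if_false]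
          rw [ih _ _ k hk', hget]

theorem bfsPath_eq_bfsAll (adj : PySem.Dict Int (List Int)) (endv : Int) :
    ∀ (fuel : Nat) (queue : List (Int × List Int)) (paths : PySem.Dict Int (List Int)),
      paths.contains endv = false →
      bfsPath endv adj fuel queue paths.keys = ((bfsAll adj fuel queue paths).get? endv).getD [] := by
  intro fuel
  induction fuel with
  | zero =>
    intro queue paths h
    simp [bfsPath, bfsAll, get?_none_of_not_contains _ _ h]
  | succ fuel ih =>
    intro queue paths h
    match queue with
    | [] => simp [bfsPath, bfsAll, get?_none_of_not_contains _ _ h]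
    | (current, path) :: queue =>
      simp only [bfsPath, bfsAll]
      by_cases hce : current = endv
      · subst hce
        rw [if_pos rfl, if_neg (by simp [h])]
        cases hadj : adj.get? current with
        | none => simp [PySem.Dict.get?_insert_self]
        | some nbrs =>
          rw [bfsAll_get?_frozen adj fuel _ _ current
                (PySem.Dict.contains_insert_self _ _ _)]
          simp [PySem.Dict.get?_insert_self]
      · rw [if_neg hce]
        by_cases hv : paths.contains current
        · rw [if_pos (by rw [set_contains_keys]; exact hv), if_pos hv]
          exact ih queue paths h
        · rw [if_neg (by rw [set_contains_keys]; exact hv), if_neg hv]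
          have hmem : current ∉ paths.keys := by
            intro hm
            exact hv ((PySem.Dict.contains_iff_mem_keys _ _).mpr hm)
          have hkeys : PySem.Set.add paths.keys current = (paths.insert current path).keys := by
            rw [PySem.Set.add_of_not_mem hmem, PySem.Dict.keys_insert_of_not_contains]
            simpa using hv
          have h' : (paths.insert current path).contains endv = false := by
            rw [PySem.Dict.contains_insert]
            simp [h, Ne.symm hce]
          cases hadj : adj.get? current with
          | none =>
            have hg : paths.get? endv = none := get?_none_of_not_contains _ _ h
            rw [PySem.Dict.get?_insert_of_ne _ _ (Ne.symm hce), hg]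
            rfl
          | some nbrs =>
            simp only [hkeys]
            simp only [set_contains_keys]
            exact ih _ _ h'

theorem bfsPath_eq_bfsAll_start (adj : PySem.Dict Int (List Int)) (endv s : Int) (fuel : Nat) :
    bfsPath endv adj fuel [(s, [s])] PySem.Set.empty
      = ((bfsAll adj fuel [(s, [s])] PySem.Dict.empty).get? endv).getD [] := by
  have h := bfsPath_eq_bfsAll adj endv fuel [(s, [s])] PySem.Dict.empty (by simp)
  simpa using h

def innerA (d : PySem.Dict Int (List Int)) (F : Nat) (endpoints : List Int) (i : Nat)
    (st : PySem.Dict (Int × Int) (List Int) × Int × List Int) (j : Nat) :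
    PySem.Dict (Int × Int) (List Int) × Int × List Int :=
  let ei := endpoints.getD i 0
  let ej := endpoints.getD j 0
  let pr :=
    match st.1.get? (ei, ej) with
    | none =>
      let p := bfsPath ej d F [(ei, [ei])] PySem.Set.empty
      (st.1.insert (ei, ej) p, p)
    | some p => (st.1, p)
  if st.2.1 < (pr.2.length : Int) then (pr.1, ((pr.2.length : Int), pr.2))
  else (pr.1, (st.2.1, st.2.2))

def innerB (d : PySem.Dict Int (List Int)) (F : Nat) (endpoints : List Int) (i : Nat)
    (best : List Int) (j : Nat) : List Int :=
  let p := bfsPath (endpoints.getD j 0) d F [(endpoints.getD i 0, [endpoints.getD i 0])] PySem.Set.empty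
  if best.length < p.length then p else best

def CacheInv (d : PySem.Dict Int (List Int)) (F : Nat)
    (cache : PySem.Dict (Int × Int) (List Int)) : Prop :=
  ∀ k p, cache.get? k = some p → p = bfsPath k.2 d F [(k.1, [k.1])] PySem.Set.empty

theorem inner_fold (d : PySem.Dict Int (List Int)) (F : Nat) (endpoints : List Int) (i : Nat) :
    ∀ (js : List Nat) (cache : PySem.Dict (Int × Int) (List Int)) (maxLen : Int) (longest : List Int),
      CacheInv d F cache → maxLen = (longest.length : Int) →
      CacheInv d F (js.foldl (innerA d F endpoints i) (cache, (maxLen, longest))).1 ∧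
      (js.foldl (innerA d F endpoints i) (cache, (maxLen, longest))).2.1
        = (((js.foldl (innerA d F endpoints i) (cache, (maxLen, longest))).2.2).length : Int) ∧
      (js.foldl (innerA d F endpoints i) (cache, (maxLen, longest))).2.2
        = js.foldl (innerB d F endpoints i) longest := by
  intro js
  induction js with
  | nil => intro cache maxLen longest hInv hLen; exact ⟨hInv, hLen, rfl⟩
  | cons j js ih =>
    intro cache maxLen longest hInv hLen
    subst hLen
    simp only [List.foldl_cons]
    cases hc : cache.get? (endpoints.getD i 0, endpoints.getD j 0) with
    | none =>
      have hInv' : CacheInv d F (cache.insert (endpoints.getD i 0, endpoints.getD j 0)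
          (bfsPath (endpoints.getD j 0) d F
            [(endpoints.getD i 0, [endpoints.getD i 0])] PySem.Set.empty)) := by
        intro k q hk
        rcases eq_or_ne k (endpoints.getD i 0, endpoints.getD j 0) with rfl | hne
        · rw [PySem.Dict.get?_insert_self] at hk
          cases hk; rfl
        · rw [PySem.Dict.get?_insert_of_ne _ _ hne] at hk
          exact hInv k q hk
      by_cases hlt : longest.length < (bfsPath (endpoints.getD j 0) d F
          [(endpoints.getD i 0, [endpoints.getD i 0])] PySem.Set.empty).length
      · have e1 : innerA d F endpoints i (cache, ((longest.length : Int), longest)) j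
            = (cache.insert (endpoints.getD i 0, endpoints.getD j 0)
                (bfsPath (endpoints.getD j 0) d F
                  [(endpoints.getD i 0, [endpoints.getD i 0])] PySem.Set.empty),
               (((bfsPath (endpoints.getD j 0) d F
                  [(endpoints.getD i 0, [endpoints.getD i 0])] PySem.Set.empty).length : Int),
                bfsPath (endpoints.getD j 0) d F
                  [(endpoints.getD i 0, [endpoints.getD i 0])] PySem.Set.empty)) := by
          simp only [innerA, hc]
          rw [if_pos (by exact_mod_cast hlt)]
        have e2 : innerB d F endpoints i longest j
            = bfsPath (endpoints.getD j 0) d F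
                [(endpoints.getD i 0, [endpoints.getD i 0])] PySem.Set.empty := by
          simp only [innerB]
          rw [if_pos hlt]
        rw [e1, e2]
        exact ih _ _ _ hInv' rfl
      · have e1 : innerA d F endpoints i (cache, ((longest.length : Int), longest)) j
            = (cache.insert (endpoints.getD i 0, endpoints.getD j 0)
                (bfsPath (endpoints.getD j 0) d F
                  [(endpoints.getD i 0, [endpoints.getD i 0])] PySem.Set.empty),
               (((longest.length : Int)), longest)) := by
          simp only [innerA, hc]
          rw [if_neg (by exact_mod_cast hlt)]
        have e2 : innerB d F endpoints i longest j = longest := by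
          simp only [innerB]
          rw [if_neg hlt]
        rw [e1, e2]
        exact ih _ _ _ hInv' rfl
    | some p =>
      have hp : p = bfsPath (endpoints.getD j 0) d F
          [(endpoints.getD i 0, [endpoints.getD i 0])] PySem.Set.empty :=
        hInv (endpoints.getD i 0, endpoints.getD j 0) p hc
      by_cases hlt : longest.length < (bfsPath (endpoints.getD j 0) d F
          [(endpoints.getD i 0, [endpoints.getD i 0])] PySem.Set.empty).length
      · have e1 : innerA d F endpoints i (cache, ((longest.length : Int), longest)) j
            = (cache, (((bfsPath (endpoints.getD j 0) d F
                  [(endpoints.getD i 0, [endpoints.getD i 0])] PySem.Set.empty).length : Int),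
                bfsPath (endpoints.getD j 0) d F
                  [(endpoints.getD i 0, [endpoints.getD i 0])] PySem.Set.empty)) := by
          simp only [innerA, hc, ← hp]
          rw [if_pos (by rw [hp]; exact_mod_cast hlt)]
        have e2 : innerB d F endpoints i longest j
            = bfsPath (endpoints.getD j 0) d F
                [(endpoints.getD i 0, [endpoints.getD i 0])] PySem.Set.empty := by
          simp only [innerB]
          rw [if_pos hlt]
        rw [e1, e2]
        exact ih _ _ _ hInv rfl
      · have e1 : innerA d F endpoints i (cache, ((longest.length : Int), longest)) j
            = (cache, (((longest.length : Int)), longest)) := by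
          simp only [innerA, hc]
          rw [if_neg (by rw [hp]; exact_mod_cast hlt)]
        have e2 : innerB d F endpoints i longest j = longest := by
          simp only [innerB]
          rw [if_neg hlt]
        rw [e1, e2]
        exact ih _ _ _ hInv rfl

theorem outer_fold (d : PySem.Dict Int (List Int)) (F : Nat) (endpoints : List Int) :
    ∀ (is : List Nat) (cache : PySem.Dict (Int × Int) (List Int)) (maxLen : Int) (longest : List Int),
      CacheInv d F cache → maxLen = (longest.length : Int) →
      (is.foldl (fun st i => ((List.range endpoints.length).drop (i + 1)).foldl
          (innerA d F endpoints i) st) (cache, (maxLen, longest))).2.2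
        = is.foldl (fun best i => ((List.range endpoints.length).drop (i + 1)).foldl
            (innerB d F endpoints i) best) longest := by
  intro is
  induction is with
  | nil => intro cache maxLen longest _ _; rfl
  | cons i is ih =>
    intro cache maxLen longest hInv hLen
    simp only [List.foldl_cons]
    obtain ⟨hInv', hLen', hEq⟩ :=
      inner_fold d F endpoints i ((List.range endpoints.length).drop (i + 1))
        cache maxLen longest hInv hLen
    have hsplit : (((List.range endpoints.length).drop (i + 1)).foldl
        (innerA d F endpoints i) (cache, (maxLen, longest)))
        = ((((List.range endpoints.length).drop (i + 1)).foldl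
            (innerA d F endpoints i) (cache, (maxLen, longest))).1,
           ((((List.range endpoints.length).drop (i + 1)).foldl
            (innerA d F endpoints i) (cache, (maxLen, longest))).2.1,
            (((List.range endpoints.length).drop (i + 1)).foldl
            (innerA d F endpoints i) (cache, (maxLen, longest))).2.2)) := by
      simp
    rw [hsplit, ih _ _ _ hInv' hLen', hEq]

theorem foldl_range_pred (H : List Int → Nat → List Int) (n : Nat)
    (hid : ∀ b, n ≠ 0 → H b (n - 1) = b) :
    (List.range n).foldl H [] = (List.range (n - 1)).foldl H [] := by
  cases n with
  | zero => rfl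
  | succ m =>
    rw [List.range_succ, List.foldl_append]
    simp only [List.foldl_cons, List.foldl_nil]
    simpa using hid _ (Nat.succ_ne_zero m)

theorem AB_eq (adj_list : List (Int × List Int)) :
    computeLongestPath adj_list = computeLongestPath_alt adj_list := by
  have hA : computeLongestPath adj_list
      = ((List.range (returnEndpointsPort adj_list 2).length).foldl (fun st i =>
          ((List.range (returnEndpointsPort adj_list 2).length).drop (i + 1)).foldl
            (innerA (PySem.Dict.mk adj_list) (pvFuel adj_list) (returnEndpointsPort adj_list 2) i) st)
        ((PySem.Dict.empty : PySem.Dict (Int × Int) (List Int)), ((0 : Int), ([] : List Int)))).2.2 := rfl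
  have hB : computeLongestPath_alt adj_list
      = (List.range ((returnEndpointsPort adj_list 2).length - 1)).foldl (fun best i =>
          ((List.range (returnEndpointsPort adj_list 2).length).drop (i + 1)).foldl
            (fun best j =>
              let p := (bfsAll (PySem.Dict.mk adj_list) (pvFuel adj_list)
                  [((returnEndpointsPort adj_list 2).getD i 0, [(returnEndpointsPort adj_list 2).getD i 0])]
                  PySem.Dict.empty).getD ((returnEndpointsPort adj_list 2).getD j 0) []
              if best.length < p.length then p else best) best) [] := rfl
  have hBB : computeLongestPath_alt adj_list
      = (List.range ((returnEndpointsPort adj_list 2).length - 1)).foldl (fun best i =>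
          ((List.range (returnEndpointsPort adj_list 2).length).drop (i + 1)).foldl
            (innerB (PySem.Dict.mk adj_list) (pvFuel adj_list) (returnEndpointsPort adj_list 2) i) best) [] := by
    rw [hB]
    have hfun : ∀ i : Nat, (fun (best : List Int) (j : Nat) =>
          let p := (bfsAll (PySem.Dict.mk adj_list) (pvFuel adj_list)
              [((returnEndpointsPort adj_list 2).getD i 0, [(returnEndpointsPort adj_list 2).getD i 0])]
              PySem.Dict.empty).getD ((returnEndpointsPort adj_list 2).getD j 0) []
          if best.length < p.length then p else best)
        = innerB (PySem.Dict.mk adj_list) (pvFuel adj_list) (returnEndpointsPort adj_list 2) i := by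
      intro i
      funext best j
      simp only [innerB, PySem.Dict.getD_eq_get?_getD, bfsPath_eq_bfsAll_start]
    simp only [hfun]
  rw [hA, hBB]
  have hout := outer_fold (PySem.Dict.mk adj_list) (pvFuel adj_list) (returnEndpointsPort adj_list 2)
    (List.range (returnEndpointsPort adj_list 2).length)
    PySem.Dict.empty 0 []
    (by intro k p hk; rw [PySem.Dict.get?_empty] at hk; cases hk)
    (by simp)
  rw [hout]
  exact foldl_range_pred _ _ (fun b hb => by
    have h1 : (returnEndpointsPort adj_list 2).length - 1 + 1
        = (returnEndpointsPort adj_list 2).length := Nat.succ_pred_eq_of_pos (Nat.pos_of_ne_zero hb)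
    rw [h1]
    have h2 : (List.range (returnEndpointsPort adj_list 2).length).drop
        ((returnEndpointsPort adj_list 2).length) = [] :=
      List.drop_eq_nil_iff.mpr (by simp)
    rw [h2]; rfl)

-- ===== VERDICT (by name: the statement is the Claim_ definition above) =====
theorem computeLongestPath_spec : Claim_equal_computeLongestPath := by
  intro adj_list _ _
  show computeLongestPath adj_list = computeLongestPath_alt adj_list
  exact AB_eq adj_list
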